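-- pv_equiv track=rewrite | github.com/HunterJHU/Quandles | old_versions/diagonalmoment.py | diagonalmoment
-- ===== SOURCE A (Python) =====
-- def diagonalmoment(l):
--
--     L = l[:]
--     return_list = [[] for i in range(len(L))]
--
--     for line in range(len(L)):
--         L[line].reverse()
--         i = line
--
--         for elem in L[line]:
--             if i >= len(return_list):
--                 return_list.append([])
--
--             return_list[i].append(elem)
--             i += 1
--
--     return_list.reverse()
--     return return_list#
-- ===== SOURCE B (Python) =====
-- def diagonalmoment(l):
--     # reverse each sublist in place (matching A's observable mutation of l's rows)
--     for row in l:
--         row.reverse()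
--     # number of anti-diagonal rows before the final reversal
--     N = len(l)
--     line = 0
--     for row in l:
--         N = max(N, line + len(row))
--         line += 1
--     # gather each output row directly from the (reversed) source rows
--     out = []
--     for i in range(N):
--         newrow = []
--         line = 0
--         for row in l:
--             if line <= i < line + len(row):
--                 newrow.append(row[i - line])
--             line += 1
--         out.append(newrow)
--     out.reverse()
--     return out
-- ===== Notes on version B (the rewrite author's own statement) =====
-- stated objective: alternative
-- what changed: B computes the output row count up front and gathers each anti-diagonal row directly from the source rows, instead of A's forward distribution of elements into buckets that grow on demand.
import Mathlib
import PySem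

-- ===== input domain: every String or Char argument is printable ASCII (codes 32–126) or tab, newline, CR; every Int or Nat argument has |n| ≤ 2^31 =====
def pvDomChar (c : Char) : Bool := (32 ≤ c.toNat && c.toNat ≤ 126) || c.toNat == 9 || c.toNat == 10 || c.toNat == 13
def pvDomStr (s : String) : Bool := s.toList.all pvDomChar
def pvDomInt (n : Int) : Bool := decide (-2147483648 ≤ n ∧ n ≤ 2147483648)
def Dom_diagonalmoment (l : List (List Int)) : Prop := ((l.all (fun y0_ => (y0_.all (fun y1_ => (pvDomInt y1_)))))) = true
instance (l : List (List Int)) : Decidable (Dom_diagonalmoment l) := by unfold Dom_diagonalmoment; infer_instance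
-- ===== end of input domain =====

-- B gathers each anti-diagonal row directly (row count computed up front) instead of A's
-- forward distribution into growing buckets; objective: simpler/alternative, same cost.
-- Both Pythons reverse l's sublists in place; the equivalence proved here is about the return value.

-- ===== PORT A =====
-- one step of A's inner loop body: pad return_list with [] if i is out of range, then append elem to row i
def pvStepElem (rl : List (List Int)) (i : Nat) (e : Int) : List (List Int) :=
  let rl2 := if rl.length ≤ i then rl ++ [[]] else rl
  rl2.set i (rl2.getD i [] ++ [e])

-- A's inner 'for elem in L[line]' loop over the reversed row, carrying (return_list, i)
def pvProcLine (rl : List (List Int)) (line : Nat) (r : List Int) : List (List Int) :=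
  (r.reverse.foldl (fun (p : List (List Int) × Nat) e => (pvStepElem p.1 p.2 e, p.2 + 1)) (rl, line)).1

-- A's outer 'for line in range(len(L))' loop
def pvProcLines (rl : List (List Int)) (line : Nat) : List (List Int) → List (List Int)
  | [] => rl
  | r :: rs => pvProcLines (pvProcLine rl line r) (line + 1) rs

def diagonalmoment (l : List (List Int)) : List (List Int) :=
  (pvProcLines (List.replicate l.length ([] : List Int)) 0 l).reverse

-- ===== PORT B =====
-- B's second loop: N = max over rows of (line + len(row)), starting from len(l)
def pvMaxRows : List (List Int) → Nat → Nat → Nat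
  | [], _, acc => acc
  | r :: rs, line, acc => pvMaxRows rs (line + 1) (max acc (line + r.length))

-- B's inner gathering loop: collect row[i - line] for each source row covering diagonal i
def pvGatherRow : List (List Int) → Nat → Nat → List Int
  | [], _, _ => []
  | r :: rs, line, i =>
      (if line ≤ i ∧ i < line + r.length then [r.getD (i - line) 0] else []) ++
        pvGatherRow rs (line + 1) i

def diagonalmoment_alt (l : List (List Int)) : List (List Int) :=
  let lr := l.map List.reverse
  let N := pvMaxRows lr 0 lr.length
  ((List.range N).map (fun i => pvGatherRow lr 0 i)).reverse

-- ===== PRECONDITION & SPEC =====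
def Spec_diagonalmoment (l : List (List Int)) (out : List (List Int)) : Prop := out = diagonalmoment_alt l
instance (l : List (List Int)) (out : List (List Int)) : Decidable (Spec_diagonalmoment l out) := by unfold Spec_diagonalmoment; infer_instance

-- ===== CLAIM (what is proved, stated in full; the proofs are below) =====
def Claim_equal_diagonalmoment : Prop := ∀ (l : List (List Int)), Dom_diagonalmoment l → Spec_diagonalmoment l (diagonalmoment l)

-- ===== LEMMAS AND PROOFS =====

theorem pv_getD_range_map (M j : Nat) (f : Nat → List Int) :
    ((List.range M).map f).getD j [] = if j < M then f j else [] := by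
  by_cases h : j < M
  · simp [List.getD, h]
  · simp [List.getD, h]

theorem pv_map_range_getD (rl : List (List Int)) :
    (List.range rl.length).map (fun j => rl.getD j []) = rl := by
  apply List.ext_getElem
  · simp
  · intro i h1 h2
    simp [List.getD_eq_getElem?_getD, List.getElem?_eq_getElem h2]

theorem pv_getD_big (rl : List (List Int)) (j : Nat) (h : rl.length ≤ j) :
    rl.getD j [] = [] := by
  simp [List.getD_eq_getElem?_getD, List.getElem?_eq_none h]

theorem pv_stepElem_getD (rl : List (List Int)) (i0 : Nat) (e : Int) (h : i0 ≤ rl.length) (j : Nat) :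
    (pvStepElem rl i0 e).getD j [] = rl.getD j [] ++ (if j = i0 then [e] else []) := by
  unfold pvStepElem
  by_cases hle : rl.length ≤ i0
  · have hi : i0 = rl.length := le_antisymm h hle
    subst hi
    simp only [if_pos hle]
    by_cases hj : j = rl.length
    · subst hj
      rw [List.getD_eq_getElem?_getD, List.getElem?_set_self (by simp)]
      rw [pv_getD_big rl _ (le_refl _), if_pos rfl]
      have : (rl ++ [([] : List Int)]).getD rl.length [] = [] := by
        rw [List.getD_append_right _ _ _ _ (le_refl _)]
        simp
      rw [this]
      simp
    · rw [List.getD_eq_getElem?_getD, List.getElem?_set_ne (Ne.symm hj), ← List.getD_eq_getElem?_getD]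
      simp only [if_neg hj, List.append_nil]
      by_cases hlt : j < rl.length
      · exact List.getD_append _ _ _ _ hlt
      · have h1 : rl.length ≤ j := Nat.le_of_not_lt hlt
        rw [pv_getD_big rl j h1]
        refine pv_getD_big _ j ?_
        by_contra hc
        push Not at hc
        simp only [List.length_append, List.length_cons, List.length_nil] at hc
        omega
  · have hlt : i0 < rl.length := Nat.lt_of_not_le hle
    simp only [if_neg hle]
    by_cases hj : j = i0
    · subst hj
      rw [List.getD_eq_getElem?_getD, List.getElem?_set_self hlt]
      simp
    · rw [List.getD_eq_getElem?_getD, List.getElem?_set_ne (Ne.symm hj), ← List.getD_eq_getElem?_getD]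
      simp [hj]

theorem pv_stepElem_length (rl : List (List Int)) (i0 : Nat) (e : Int) (h : i0 ≤ rl.length) :
    (pvStepElem rl i0 e).length = max rl.length (i0 + 1) := by
  unfold pvStepElem
  by_cases hle : rl.length ≤ i0
  · simp only [if_pos hle, List.length_set, List.length_append, List.length_cons,
      List.length_nil]
    rw [Nat.max_def]
    split_ifs <;> omega
  · simp only [if_neg hle, List.length_set]
    rw [Nat.max_eq_left (by omega)]

-- characterisation of A's inner loop: distributes es one-per-row starting at i0, growing as needed
theorem pv_inner (es : List Int) :
    ∀ (rl : List (List Int)) (i0 : Nat), i0 ≤ rl.length →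
    (es.foldl (fun (p : List (List Int) × Nat) e => (pvStepElem p.1 p.2 e, p.2 + 1)) (rl, i0)).1
      = (List.range (max rl.length (i0 + es.length))).map
          (fun j => rl.getD j [] ++ (if i0 ≤ j ∧ j < i0 + es.length then [es.getD (j - i0) 0] else [])) := by
  induction es with
  | nil =>
      intro rl i0 h
      have hm : max rl.length (i0 + 0) = rl.length := Nat.max_eq_left (by omega)
      simp only [List.foldl_nil, List.length_nil, hm]
      have : ∀ j, rl.getD j [] ++ (if i0 ≤ j ∧ j < i0 + 0 then [List.getD [] (j - i0) 0] else [])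
          = rl.getD j [] := by
        intro j
        rw [if_neg (by omega)]
        simp
      exact ((List.map_congr_left (fun j _ => this j)).trans (pv_map_range_getD rl)).symm
  | cons e es ih =>
      intro rl i0 h
      simp only [List.foldl_cons]
      have hlen : i0 + 1 ≤ (pvStepElem rl i0 e).length := by
        rw [pv_stepElem_length rl i0 e h]; omega
      rw [ih (pvStepElem rl i0 e) (i0 + 1) hlen]
      have hm : max (pvStepElem rl i0 e).length (i0 + 1 + es.length)
          = max rl.length (i0 + (e :: es).length) := by
        rw [pv_stepElem_length rl i0 e h]
        simp only [List.length_cons, Nat.max_def]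
        split_ifs <;> omega
      rw [hm]
      apply List.map_congr_left
      intro j _
      rw [pv_stepElem_getD rl i0 e h j, List.append_assoc]
      congr 1
      by_cases hj : j = i0
      · subst hj
        rw [if_pos rfl, if_neg (by omega), if_pos (by simp only [List.length_cons]; omega)]
        simp
      · rw [if_neg hj]
        by_cases hc : i0 + 1 ≤ j ∧ j < i0 + 1 + es.length
        · rw [if_pos hc, if_pos (by simp only [List.length_cons]; omega)]
          have hk : j - i0 = (j - (i0 + 1)) + 1 := by omega
          rw [hk]
          simp
        · rw [if_neg hc, if_neg (by simp only [List.length_cons]; omega)]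
          simp

-- main invariant for A's outer loop
theorem pv_outer (rs : List (List Int)) :
    ∀ (rl : List (List Int)) (line : Nat), line + rs.length ≤ rl.length →
    pvProcLines rl line rs
      = (List.range (pvMaxRows (rs.map List.reverse) line rl.length)).map
          (fun j => rl.getD j [] ++ pvGatherRow (rs.map List.reverse) line j) := by
  induction rs with
  | nil =>
      intro rl line h
      simp only [pvProcLines, List.map_nil, pvMaxRows, pvGatherRow, List.append_nil]
      exact (pv_map_range_getD rl).symm
  | cons r rs ih =>
      intro rl line h
      simp only [List.length_cons] at h
      have hline : line ≤ rl.length := by omega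
      have hstep : pvProcLine rl line r
          = (List.range (max rl.length (line + r.length))).map
              (fun j => rl.getD j [] ++ (if line ≤ j ∧ j < line + r.reverse.length
                  then [r.reverse.getD (j - line) 0] else [])) := by
        unfold pvProcLine
        rw [pv_inner r.reverse rl line hline]
        simp
      have hlen2 : (line + 1) + rs.length ≤ (pvProcLine rl line r).length := by
        rw [hstep]
        simp only [List.length_map, List.length_range, Nat.max_def]
        split_ifs <;> omega
      simp only [pvProcLines]
      rw [ih (pvProcLine rl line r) (line + 1) hlen2]
      have hlenP : (pvProcLine rl line r).length = max rl.length (line + r.length) := by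
        rw [hstep]; simp
      have hgetD : ∀ j, (pvProcLine rl line r).getD j []
          = rl.getD j [] ++ (if line ≤ j ∧ j < line + r.reverse.length
              then [r.reverse.getD (j - line) 0] else []) := by
        intro j
        rw [hstep, pv_getD_range_map]
        by_cases hj : j < max rl.length (line + r.length)
        · rw [if_pos hj]
        · rw [if_neg hj]
          rw [pv_getD_big rl j (by omega), if_neg (by simp; omega)]
          simp
      have hmax : pvMaxRows ((r :: rs).map List.reverse) line rl.length
          = pvMaxRows (rs.map List.reverse) (line + 1) (pvProcLine rl line r).length := by
        simp only [List.map_cons, pvMaxRows, hlenP, List.length_reverse]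
      rw [← hmax]
      apply List.map_congr_left
      intro j _
      rw [hgetD j]
      simp only [List.map_cons, pvGatherRow, List.append_assoc]

-- ===== VERDICT (by name: the statement is the Claim_ definition above) =====
theorem diagonalmoment_spec : Claim_equal_diagonalmoment := by
  intro l _
  unfold Spec_diagonalmoment diagonalmoment diagonalmoment_alt
  rw [pv_outer l (List.replicate l.length ([] : List Int)) 0 (by simp)]
  congr 1
  have hrep : ∀ j, (List.replicate l.length ([] : List Int)).getD j [] = [] := by
    intro j
    by_cases hj : j < l.length
    · simp [List.getD_eq_getElem?_getD, hj]
    · exact pv_getD_big _ j (by simpa using Nat.le_of_not_lt hj)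
  have hN : (l.map List.reverse).length = (List.replicate l.length ([] : List Int)).length := by simp
  rw [← hN]
  apply List.map_congr_left
  intro j _
  rw [hrep j]
  simp
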